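-- pv_equiv track=rewrite | github.com/gabsintchoust/math-operators | gabonacci.py | gabonnaci
-- ===== SOURCE A (Python) =====
-- def gabonnaci(n):
--   """
--   Calcule les n premiers termes d'une suite numérique définie par récurrence.
--
--   Args:
--     n: Le nombre de termes à calculer.
--
--   Returns:
--     Une liste contenant les n premiers termes de la suite.
--   """
--   #gabonnaci because a little like Fibonacci or tribonnaci for example and I am Gab-Sint Choust
--
--   suite = [0]
--   result = [suite.copy()]
--
--   compteur_boucle2 = 1
--   n_boucle2 = 1
--   for i in range(1, n):
--       nouvelle_suite = [suite[-1]]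
--       n_boucle2 = n_boucle2 + 1
--       for j in range(1, len(suite)):
--           nouvelle_suite.append(suite[j] + sum(suite[:j]))
--
--       if n_boucle2 >= compteur_boucle2:
--           n_boucle2 = 0
--           nouvelle_suite.append(compteur_boucle2)
--           compteur_boucle2 += 1
--
--       nouvelle_suite.sort()
--
--       suite = nouvelle_suite
--       result.append(suite.copy())
--
--   return result
-- ===== SOURCE B (Python) =====
-- def gabonnaci(n):
--     """Each new term suite[j] + sum(suite[:j]) is exactly the (j+1)-th prefix
--     sum of the current row, so the next row is just [last] + prefix_sums[1:];
--     the (compteur_boucle2, n_boucle2) pair collapses to a triangular trigger."""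
--     result = [[0]]
--     suite, k, trigger, i = [0], 1, 1, 1
--     while i < n:
--         ps, s = [], 0
--         for x in suite:
--             s += x
--             ps.append(s)
--         row = sorted([suite[-1]] + ps[1:] + ([k] if i == trigger else []))
--         if i == trigger:
--             k += 1
--             trigger += k
--         result.append(row)
--         suite = row
--         i += 1
--     return result
-- ===== Notes on version B (the rewrite author's own statement) =====
-- stated objective: faster
-- what changed: B observes that A's inner term suite[j]+sum(suite[:j]) is exactly the (j+1)-th prefix sum of the row, so each new row is built in one cumulative-sum pass as [last]+prefix_sums[1:], and the (compteur_boucle2, n_boucle2) counting pair is replaced by a triangular-number trigger; intended as faster, measured ~4.25x at the largest size both complete (both eventually time out because the terms' bit-length grows exponentially with n).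
import Mathlib
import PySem

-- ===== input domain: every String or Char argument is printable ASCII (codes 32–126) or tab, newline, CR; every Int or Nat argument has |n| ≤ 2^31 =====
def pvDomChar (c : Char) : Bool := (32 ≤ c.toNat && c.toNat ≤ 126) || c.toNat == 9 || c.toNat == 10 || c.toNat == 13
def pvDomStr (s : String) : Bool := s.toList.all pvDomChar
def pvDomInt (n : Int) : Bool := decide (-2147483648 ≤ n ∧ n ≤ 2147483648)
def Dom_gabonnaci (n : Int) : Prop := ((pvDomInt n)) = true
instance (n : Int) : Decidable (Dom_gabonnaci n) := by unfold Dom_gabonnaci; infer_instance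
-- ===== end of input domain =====

-- B builds each new row in one cumulative-sum pass ([last] + prefix_sums[1:],
-- since A's term suite[j]+sum(suite[:j]) is the (j+1)-th prefix sum) and replaces
-- A's (compteur_boucle2, n_boucle2) counting pair by a triangular-number trigger;
-- intended as faster (fewer additions); a timing run measured B ~4.25x faster
-- at the largest size both complete, though both time out on the very largest
-- inputs (the terms' bit-length grows exponentially with n).

-- ===== PORT A =====
-- A's inner loop: nouvelle_suite = [suite[-1]]; for j in range(1,len): append suite[j]+sum(suite[:j])
def rowA (suite : List Int) : List Int :=
  (PySem.List.pyRange 1 (suite.length : Int) 1).foldl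
    (fun acc j => acc ++ [PySem.List.pyGetD suite j 0 +
                          (PySem.List.slice suite (some 0) (some j)).sum])
    [PySem.List.pyGetD suite (-1) 0]

-- A's loop body for 'for i in range(1, n)' (A never uses the loop variable i);
-- state = (suite, result, compteur_boucle2, n_boucle2)
def stepA (st : List Int × List (List Int) × Int × Int) (_i : Int) :
    List Int × List (List Int) × Int × Int :=
  let nb := st.2.2.2 + 1
  let res := if nb ≥ st.2.2.1 then (rowA st.1 ++ [st.2.2.1], st.2.2.1 + 1, (0 : Int))
             else (rowA st.1, st.2.2.1, nb)
  let ns := PySem.List.sorted res.1 (fun x => x) false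
  (ns, st.2.1 ++ [ns], res.2.1, res.2.2)

def gabonnaci (n : Int) : List (List Int) :=
  ((PySem.List.pyRange 1 n 1).foldl stepA ([0], [[0]], 1, 1)).2.1

-- ===== PORT B =====
-- Source B's cumulative-sum pass: ps built left to right with accumulator s
def prefixSums : List Int → Int → List Int
  | [], _ => []
  | x :: xs, s => (s + x) :: prefixSums xs (s + x)

-- Source B's while loop as fuel recursion; fuel = remaining iterations (n - i)
def loopB : Nat → Int → List Int → Int → Int → List (List Int)
  | 0, _, _, _, _ => []
  | m + 1, i, suite, k, t =>
      let row := PySem.List.sorted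
        (PySem.List.pyGetD suite (-1) 0 :: ((prefixSums suite 0).drop 1 ++
          (if i = t then [k] else []))) (fun x => x) false
      row :: (if i = t then loopB m (i + 1) row (k + 1) (t + (k + 1))
              else loopB m (i + 1) row k t)

def gabonnaci_alt (n : Int) : List (List Int) :=
  [0] :: loopB (n - 1).toNat 1 [0] 1 1

-- ===== PRECONDITION & SPEC =====
def Spec_gabonnaci (n : Int) (out : List (List Int)) : Prop := out = gabonnaci_alt n
instance (n : Int) (out : List (List Int)) : Decidable (Spec_gabonnaci n out) := by unfold Spec_gabonnaci; infer_instance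

-- ===== CLAIM (what is proved, stated in full; the proofs are below) =====
def Claim_equal_gabonnaci : Prop := ∀ (n : Int), Dom_gabonnaci n → Spec_gabonnaci n (gabonnaci n)

-- ===== LEMMAS AND PROOFS =====

lemma prefixSums_length (s : List Int) (a : Int) : (prefixSums s a).length = s.length := by
  induction s generalizing a with
  | nil => rfl
  | cons x xs ih => simp [prefixSums, ih]

lemma prefixSums_getD (s : List Int) (a : Int) (j : Nat) (hj : j < s.length) :
    (prefixSums s a).getD j 0 = a + (s.take (j + 1)).sum := by
  induction s generalizing a j with
  | nil => simp at hj
  | cons x xs ih =>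
    cases j with
    | zero => simp [prefixSums]
    | succ j =>
      have h' : j < xs.length := by simpa using hj
      simp only [prefixSums, List.getD_cons_succ, List.take_succ_cons, List.sum_cons,
        ih (a + x) j h']
      ring

lemma take_succ_sum (s : List Int) (p : Nat) :
    (s.take (p + 1)).sum = (s.take p).sum + s.getD p 0 := by
  rw [List.take_add_one, List.sum_append]
  cases h : s[p]? with
  | none => simp [List.getD, h]
  | some v => simp [List.getD, h]

lemma getD_drop_one (xs : List Int) (p : Nat) : (xs.drop 1).getD p 0 = xs.getD (p + 1) 0 := by
  cases xs <;> simp [List.getD]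

-- A's inner-loop fold produces exactly the prefix sums of suite, indices 1..m-1
lemma rowA_partial (s : List Int) (m : Nat) (hm : m ≤ s.length) :
    (PySem.List.pyRange 1 (m : Int) 1).foldl
      (fun acc j => acc ++ [PySem.List.pyGetD s j 0 +
                            (PySem.List.slice s (some 0) (some j)).sum])
      [PySem.List.pyGetD s (-1) 0]
    = PySem.List.pyGetD s (-1) 0 :: ((prefixSums s 0).drop 1).take (m - 1) := by
  induction m with
  | zero => simp [PySem.List.pyRange_one_eq_nil (by omega : (0:Int) ≤ 1)]
  | succ m ih =>
    rcases Nat.eq_zero_or_pos m with hm0 | hm0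
    · subst hm0; simp
    · rw [show ((m + 1 : Nat) : Int) = ((m : Nat) : Int) + 1 by push_cast; ring,
        PySem.List.pyRange_one_succ_right (by exact_mod_cast hm0 : (1:Int) ≤ ((m:Nat):Int)),
        List.foldl_append, ih (by omega)]
      have hm' : m < s.length := by omega
      have hget : PySem.List.pyGetD s ((m : Nat) : Int) 0 = s.getD m 0 := by
        simp [PySem.List.pyGetD_natCast]
      have hslice : PySem.List.slice s (some 0) (some ((m : Nat) : Int)) = s.take m := by
        rw [PySem.List.slice_zero_start, PySem.List.slice_to_natCast]
      have hval : PySem.List.pyGetD s ((m : Nat) : Int) 0 +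
          (PySem.List.slice s (some 0) (some ((m : Nat) : Int))).sum
          = ((prefixSums s 0).drop 1).getD (m - 1) 0 := by
        rw [hget, hslice, getD_drop_one, show m - 1 + 1 = m by omega,
          prefixSums_getD s 0 m hm', take_succ_sum]
        ring
      have htake : ((prefixSums s 0).drop 1).take (m + 1 - 1)
          = ((prefixSums s 0).drop 1).take (m - 1) ++ [((prefixSums s 0).drop 1).getD (m - 1) 0] := by
        have hlen : m - 1 < ((prefixSums s 0).drop 1).length := by
          simp [prefixSums_length]; omega
        rw [List.getD_eq_getElem _ _ hlen, show m + 1 - 1 = (m - 1) + 1 by omega,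
          List.take_add_one, List.getElem?_eq_getElem hlen]
        rfl
      simp only [List.foldl_cons, List.foldl_nil, hval, htake, List.cons_append]

lemma rowA_eq (s : List Int) :
    rowA s = PySem.List.pyGetD s (-1) 0 :: (prefixSums s 0).drop 1 := by
  unfold rowA
  rw [rowA_partial s s.length le_rfl, List.take_of_length_le]
  simp [prefixSums_length]

-- invariant tying A's (compteur_boucle2, n_boucle2) to B's (k, trigger) before iteration i
def CtrInv (i : Int) (cb : Int × Int) (k t : Int) : Prop :=
  cb.1 = k ∧ 1 ≤ k ∧ i ≤ t ∧ (cb.2 + 1 ≥ cb.1 ↔ t ≤ i) ∧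
  (i < t → cb.2 = i - 1 - (t - k))

lemma stepA_pos (sA : List Int × List (List Int) × Int × Int) (i : Int)
    (h : sA.2.2.2 + 1 ≥ sA.2.2.1) :
    stepA sA i = (PySem.List.sorted (rowA sA.1 ++ [sA.2.2.1]) (fun x => x) false,
      sA.2.1 ++ [PySem.List.sorted (rowA sA.1 ++ [sA.2.2.1]) (fun x => x) false],
      sA.2.2.1 + 1, 0) := by
  simp [stepA, if_pos h]

lemma stepA_neg (sA : List Int × List (List Int) × Int × Int) (i : Int)
    (h : ¬ (sA.2.2.2 + 1 ≥ sA.2.2.1)) :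
    stepA sA i = (PySem.List.sorted (rowA sA.1) (fun x => x) false,
      sA.2.1 ++ [PySem.List.sorted (rowA sA.1) (fun x => x) false],
      sA.2.2.1, sA.2.2.2 + 1) := by
  simp [stepA, if_neg h]

lemma fold_eq (m : Nat) : ∀ (i : Int) (sA : List Int × List (List Int) × Int × Int)
    (k t : Int), CtrInv i sA.2.2 k t →
    ((PySem.List.pyRange i (i + m) 1).foldl stepA sA).2.1
      = sA.2.1 ++ loopB m i sA.1 k t := by
  induction m with
  | zero =>
    intro i sA k t _
    rw [PySem.List.pyRange_one_eq_nil (by omega : i + ((0:Nat):Int) ≤ i)]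
    simp [loopB]
  | succ m ih =>
    intro i sA k t hc
    obtain ⟨h1, h2, h3, h4, h5⟩ := hc
    have hlt : i < i + ((m + 1 : Nat) : Int) := by push_cast; omega
    rw [PySem.List.pyRange_one_cons hlt, List.foldl_cons,
      show i + ((m + 1 : Nat) : Int) = (i + 1) + ((m : Nat) : Int) by push_cast; ring]
    by_cases hit : i = t
    · have hA : sA.2.2.2 + 1 ≥ sA.2.2.1 := h4.mpr (le_of_eq hit.symm)
      have hinv : CtrInv (i + 1) ((sA.2.2.1 + 1 : Int), (0 : Int))
          (sA.2.2.1 + 1) (t + (sA.2.2.1 + 1)) := by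
        unfold CtrInv; dsimp only
        exact ⟨rfl, by omega, by omega, by omega, by intro h; omega⟩
      rw [stepA_pos sA i hA, ih (i + 1)
        (PySem.List.sorted (rowA sA.1 ++ [sA.2.2.1]) (fun x => x) false,
          sA.2.1 ++ [PySem.List.sorted (rowA sA.1 ++ [sA.2.2.1]) (fun x => x) false],
          sA.2.2.1 + 1, 0)
        (sA.2.2.1 + 1) (t + (sA.2.2.1 + 1)) hinv]
      have hrow : PySem.List.sorted (rowA sA.1 ++ [sA.2.2.1]) (fun x => x) false
          = PySem.List.sorted (PySem.List.pyGetD sA.1 (-1) 0 ::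
              ((prefixSums sA.1 0).drop 1 ++ [k])) (fun x => x) false := by
        rw [rowA_eq, h1, List.cons_append]
      simp only [loopB]
      rw [if_pos hit, if_pos hit, hrow, h1]
      simp [List.append_assoc]
    · have hA : ¬ (sA.2.2.2 + 1 ≥ sA.2.2.1) := fun h => hit (le_antisymm h3 (h4.mp h))
      have hi5 := h5 (lt_of_le_of_ne h3 hit)
      have hinv : CtrInv (i + 1) (sA.2.2.1, sA.2.2.2 + 1) k t := by
        unfold CtrInv; dsimp only
        exact ⟨h1, by omega, by omega, by omega, by intro h; omega⟩
      rw [stepA_neg sA i hA, ih (i + 1)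
        (PySem.List.sorted (rowA sA.1) (fun x => x) false,
          sA.2.1 ++ [PySem.List.sorted (rowA sA.1) (fun x => x) false],
          sA.2.2.1, sA.2.2.2 + 1)
        k t hinv]
      have hrow : PySem.List.sorted (rowA sA.1) (fun x => x) false
          = PySem.List.sorted (PySem.List.pyGetD sA.1 (-1) 0 ::
              ((prefixSums sA.1 0).drop 1 ++ [])) (fun x => x) false := by
        rw [rowA_eq, List.append_nil]
      simp only [loopB]
      rw [if_neg hit, if_neg hit, hrow]
      simp [List.append_assoc]

-- ===== VERDICT (by name: the statement is the Claim_ definition above) =====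
theorem gabonnaci_spec : Claim_equal_gabonnaci := by
  intro n _
  unfold Spec_gabonnaci gabonnaci gabonnaci_alt
  by_cases h : n ≤ 1
  · rw [PySem.List.pyRange_one_eq_nil h, show (n - 1).toNat = 0 by omega]
    simp [loopB]
  · have hinv : CtrInv 1 ((1 : Int), (1 : Int)) 1 1 := by
      refine ⟨rfl, by omega, by omega, by constructor <;> intro <;> omega, by intro; omega⟩
    have hn : n = 1 + (((n - 1).toNat : Nat) : Int) := by omega
    rw [hn, show (1 + (((n - 1).toNat : Nat) : Int) - 1).toNat = (n - 1).toNat by omega]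
    simpa using fold_eq (n - 1).toNat 1 ([0], [[0]], 1, 1) 1 1 hinv
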